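-- pv_equiv track=rewrite | github.com/AymanGosh/google-reichman-program | 03-Dictionaries/ex37.py | letter_counter
-- ===== SOURCE A (Python) =====
-- def letter_counter(s: str) -> dict[str, int]:
--     """Returns the count of letters in s.
--
--     Returns a dictionary. Keys are lowercase letters, values are the number of
--     times this letter appears in the sentence (as a lowercase or an uppercase
--     letter).
--     """
--     lettersNumber = {}
--     word = s.lower()
--     filtered_string = "".join([char for char in word if char.isalpha()])
--
--     for l in filtered_string:
--         if l in lettersNumber:
--             lettersNumber[l] += 1
--         else:
--             lettersNumber[l] = 1
--     return lettersNumber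
-- ===== SOURCE B (Python) =====
-- def letter_counter(s: str) -> dict[str, int]:
--     """Returns the count of letters in s (lowercase keys, case-insensitive counts)."""
--     word = [c for c in s.lower() if c.isalpha()]
--     return {c: word.count(c) for c in dict.fromkeys(word)}
-- ===== Notes on version B (the rewrite author's own statement) =====
-- stated objective: idiomatic
-- what changed: Replaces the accumulating dict loop (per-character membership test + increment) by a dict comprehension: dedup the filtered lowercase letters once, then count each distinct letter with one list.count scan.
import Mathlib
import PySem

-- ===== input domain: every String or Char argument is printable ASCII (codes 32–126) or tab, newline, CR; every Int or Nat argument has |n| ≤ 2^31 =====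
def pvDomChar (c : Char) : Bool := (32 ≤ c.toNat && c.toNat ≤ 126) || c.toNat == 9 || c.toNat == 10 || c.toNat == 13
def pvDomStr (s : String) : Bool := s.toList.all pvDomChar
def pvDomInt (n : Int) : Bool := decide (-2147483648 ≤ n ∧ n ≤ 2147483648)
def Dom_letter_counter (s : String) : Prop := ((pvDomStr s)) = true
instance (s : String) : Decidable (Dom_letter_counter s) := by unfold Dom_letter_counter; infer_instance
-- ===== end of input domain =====

-- B replaces A's accumulating dict loop by dedup-then-count-per-distinct-letter (idiomatic dict comprehension); same values.

-- ===== PORT A =====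
-- iterating a Python str yields length-1 strings: each char c becomes the key String.ofList [c]
def letter_counter (s : String) : List (String × Int) :=
  let word := PySem.Chars.lower s.toList
  let filtered := word.filter PySem.Chars.isalpha
  let lettersNumber := filtered.foldl
    (fun (d : PySem.Dict String Int) c =>
      let l := String.ofList [c]
      if d.contains l then d.insert l (d.getD l 0 + 1) else d.insert l 1)
    PySem.Dict.empty
  lettersNumber.items

-- ===== PORT B =====
def letter_counter_alt (s : String) : List (String × Int) :=
  let word := ((PySem.Chars.lower s.toList).filter PySem.Chars.isalpha).map (fun c => String.ofList [c])
  (PySem.List.dedup word).map (fun k => (k, (word.count k : Int)))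

-- ===== PRECONDITION & SPEC =====
def Spec_letter_counter (s : String) (out : List (String × Int)) : Prop := out = letter_counter_alt s
instance (s : String) (out : List (String × Int)) : Decidable (Spec_letter_counter s out) := by unfold Spec_letter_counter; infer_instance

-- ===== CLAIM (what is proved, stated in full; the proofs are below) =====
def Claim_equal_letter_counter : Prop := ∀ (s : String), Dom_letter_counter s → Spec_letter_counter s (letter_counter s)

-- ===== LEMMAS AND PROOFS =====

-- A's loop body, with the key already mapped, is exactly the counter step 'insert x (getD x 0 + 1)'
theorem pv_step_eq (d : PySem.Dict String Int) (x : String) :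
    (if d.contains x then d.insert x (d.getD x 0 + 1) else d.insert x 1) =
    d.insert x (d.getD x 0 + 1) := by
  by_cases h : d.contains x = true
  · simp [h]
  · simp only [Bool.not_eq_true] at h
    simp [h, PySem.Dict.getD_of_not_contains d (0 : Int) h]

-- A's loop over characters is the counter loop over the corresponding length-1 strings
theorem pv_fold_eq (xs : List Char) (d : PySem.Dict String Int) :
    xs.foldl (fun (d : PySem.Dict String Int) c =>
      let l := String.ofList [c]
      if d.contains l then d.insert l (d.getD l 0 + 1) else d.insert l 1) d
    = (xs.map (fun c => String.ofList [c])).foldl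
        (fun d x => d.insert x (d.getD x 0 + 1)) d := by
  simp only [pv_step_eq]
  exact (List.foldl_map (f := fun c => String.ofList [c])
    (g := fun (d : PySem.Dict String Int) x => d.insert x (d.getD x 0 + 1))).symm

-- ===== VERDICT (by name: the statement is the Claim_ definition above) =====
theorem letter_counter_spec : Claim_equal_letter_counter := by
  intro s _
  unfold Spec_letter_counter letter_counter letter_counter_alt
  dsimp only
  rw [pv_fold_eq]
  rw [PySem.Dict.foldl_insert_getD_add_one_eq_counter, PySem.Dict.items_counter,
    PySem.List.dedup_eq_ofList]
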